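-- pv_equiv track=rewrite | github.com/gabrielx16x/TRABALHO_PEST | PEST-Gabriel.py | espaco
-- ===== SOURCE A (Python) =====
-- def espaco(texto):
--     espacos = 0
--     for i in range(0, len(texto)):
--         if texto[i:i+1] == ' ':
--             espacos += 1
--     if espacos == len(texto):
--        return True
--     else:
--        return False
-- ===== SOURCE B (Python) =====
-- def espaco(texto):
--     return texto == ' ' * len(texto)
-- ===== Notes on version B (the rewrite author's own statement) =====
-- stated objective: simpler
-- what changed: Replaces the per-character counting loop and final count-vs-length comparison with a single closed-form comparison against the all-spaces string of the same length.
import Mathlib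
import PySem

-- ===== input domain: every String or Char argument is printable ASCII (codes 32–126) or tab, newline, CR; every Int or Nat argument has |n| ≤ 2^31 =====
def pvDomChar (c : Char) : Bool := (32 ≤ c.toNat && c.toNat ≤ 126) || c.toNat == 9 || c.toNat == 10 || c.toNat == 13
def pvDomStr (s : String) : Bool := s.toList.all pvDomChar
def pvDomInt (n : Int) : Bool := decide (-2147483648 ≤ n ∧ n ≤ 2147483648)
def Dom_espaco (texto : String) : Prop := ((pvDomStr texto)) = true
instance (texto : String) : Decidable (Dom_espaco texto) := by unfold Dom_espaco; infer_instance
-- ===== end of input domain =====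

-- B replaces A's per-character counting loop with one closed-form comparison against the all-spaces string of the same length (same value everywhere).

-- ===== PORT A =====
-- count spaces with a loop over range(0, len(texto)), comparing the slice texto[i:i+1] to ' ', then compare the count to len(texto)
def espaco (texto : String) : Bool :=
  let cs := texto.toList
  let espacos : Int :=
    (PySem.List.pyRange 0 (cs.length : Int) 1).foldl
      (fun acc i =>
        if PySem.List.slice cs (some i) (some (i + 1)) = [' '] then acc + 1 else acc)
      0
  if espacos = (cs.length : Int) then true else false

-- ===== PORT B =====
-- texto == ' ' * len(texto)
def espaco_alt (texto : String) : Bool :=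
  texto.toList == List.replicate texto.toList.length ' '

-- ===== PRECONDITION & SPEC =====
def Spec_espaco (texto : String) (out : Bool) : Prop := out = espaco_alt texto
instance (texto : String) (out : Bool) : Decidable (Spec_espaco texto out) := by unfold Spec_espaco; infer_instance

-- ===== CLAIM (what is proved, stated in full; the proofs are below) =====
def Claim_equal_espaco : Prop := ∀ (texto : String), Dom_espaco texto → Spec_espaco texto (espaco texto)

-- ===== LEMMAS AND PROOFS =====

-- the slice texto[i:i+1] at an in-range index is the one-character list
lemma slice_one_char (cs : List Char) (k : Nat) (hk : k < cs.length) :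
    PySem.List.slice cs (some (k : Int)) (some ((k : Int) + 1)) = [cs[k]] := by
  rw [PySem.List.slice_toNat cs (a := (k : Int)) (b := (k : Int) + 1) (by omega) (by omega)]
  have h1 : ((k : Int) + 1).toNat - ((k : Int)).toNat = 1 := by omega
  have h2 : ((k : Int)).toNat = k := by omega
  rw [h1, h2]
  rw [List.take_one, List.head?_drop]
  simp [List.getElem?_eq_getElem hk]

-- the counting loop over range(0, n) counts the spaces among the first n characters
lemma count_loop (cs : List Char) :
    ∀ n : Nat, n ≤ cs.length →
      (PySem.List.pyRange 0 (n : Int) 1).foldl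
        (fun acc i =>
          if PySem.List.slice cs (some i) (some (i + 1)) = [' '] then acc + 1 else acc)
        (0 : Int)
      = ((cs.take n).countP (fun c => c = ' ') : Int) := by
  intro n hn
  induction n with
  | zero => simp [PySem.List.pyRange_zero_nat]
  | succ m ih =>
    have hm : m ≤ cs.length := by omega
    have hlt : m < cs.length := by omega
    have hsplit : ((m : Int) + 1) = ((m + 1 : Nat) : Int) := by push_cast; ring
    rw [← hsplit, PySem.List.pyRange_one_succ_right (by omega), List.foldl_append, ih hm]
    have htake : cs.take (m + 1) = cs.take m ++ [cs[m]] := List.take_succ_eq_append_getElem hlt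
    rw [htake, List.countP_append]
    simp only [List.foldl_cons, List.foldl_nil, slice_one_char cs m hlt, List.countP_cons,
      List.countP_nil]
    by_cases h : cs[m] = ' ' <;> simp [h] <;> push_cast <;> ring

-- ===== VERDICT (by name: the statement is the Claim_ definition above) =====
theorem espaco_spec : Claim_equal_espaco := by
  intro texto _
  unfold Spec_espaco espaco espaco_alt
  set cs := texto.toList with hcs
  simp only
  rw [count_loop cs cs.length le_rfl, List.take_length]
  have key : (List.countP (fun c => decide (c = ' ')) cs = cs.length) ↔
      (cs = List.replicate cs.length ' ') := by
    rw [List.countP_eq_length, List.eq_replicate_iff]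
    simp
  by_cases h : cs = List.replicate cs.length ' '
  · have hc : ((List.countP (fun c => decide (c = ' ')) cs : Int)) = (cs.length : Int) := by
      exact_mod_cast key.mpr h
    rw [if_pos hc]
    exact ((beq_iff_eq).mpr h).symm
  · have hc : ¬ ((List.countP (fun c => decide (c = ' ')) cs : Int) = (cs.length : Int)) := by
      exact_mod_cast fun he => h (key.mp he)
    rw [if_neg hc]
    exact (beq_eq_false_iff_ne.mpr h).symm
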